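-- pv_equiv track=rewrite | github.com/panuscha/topic_modelling_jerome | save_jerome/save_blocks_without_names.py | find_ngram_positions
-- ===== SOURCE A (Python) =====
-- def find_ngram_positions(string, ngrams):
--     # Initialize a dictionary to store n-gram positions
--     ngram_positions = []
--
--     # Iterate over the n-grams
--     for ngram in ngrams:
--         positions = []
--         start_index = 0
--
--         # Find the index of the first occurrence of the n-gram in the string
--         while True:
--             position = string.find(ngram, start_index)
--
--             # If the n-gram is found, record its position and update the start index
--             if position != -1:
--                 positions.append(position + 1)  # Adding 1 to match the human-readable position
--                 start_index = position + 1
--             else: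
--                 break
--
--         # If any positions were found, add them to the dictionary
--         if positions:
--             ngram_positions.extend(positions)
--
--     return ngram_positions
-- ===== SOURCE B (Python) =====
-- def find_ngram_positions(string, ngrams):
--     # one left-to-right scan over the string; matches are collected per ngram
--     # in a hash map and read back out in the order the ngrams were given
--     n = len(string)
--     hits = {}
--     for ngram in ngrams:
--         if ngram not in hits:
--             hits[ngram] = []
--     lengths = sorted({len(ngram) for ngram in ngrams})
--     for i in range(n + 1):
--         for L in lengths:
--             if i + L <= n:
--                 sub = string[i:i + L]
--                 if sub in hits:
--                     hits[sub].append(i + 1)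
--     return [p for ngram in ngrams for p in hits[ngram]]
-- ===== Notes on version B (the rewrite author's own statement) =====
-- stated objective: faster
-- what changed: Instead of A's one while/str.find pass over the string per ngram, B makes a single left-to-right scan over the string, looking each candidate substring (one per distinct ngram length) up in a hash map keyed by the ngrams, and reads the collected per-ngram position lists back out in the given ngram order.
import Mathlib
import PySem

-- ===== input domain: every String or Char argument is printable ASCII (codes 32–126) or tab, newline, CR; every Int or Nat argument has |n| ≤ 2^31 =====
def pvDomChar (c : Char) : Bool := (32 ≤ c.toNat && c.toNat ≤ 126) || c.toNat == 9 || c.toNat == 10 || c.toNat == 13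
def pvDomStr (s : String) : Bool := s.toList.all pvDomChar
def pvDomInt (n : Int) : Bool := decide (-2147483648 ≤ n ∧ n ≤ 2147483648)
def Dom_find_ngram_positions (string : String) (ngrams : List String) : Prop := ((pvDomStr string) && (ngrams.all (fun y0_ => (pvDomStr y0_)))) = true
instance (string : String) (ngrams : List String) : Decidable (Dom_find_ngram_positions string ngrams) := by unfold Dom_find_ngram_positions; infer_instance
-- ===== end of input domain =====

-- B replaces A's per-ngram find-loop passes over the string by ONE left-to-right scan
-- that looks every candidate substring up in a hash map keyed by the ngrams and collects
-- the matches per ngram, read back out in the given ngram order (objective: faster —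
-- one shared scan instead of one pass per ngram).

-- ===== PORT A =====
-- the `while True: position = string.find(ngram, start_index) …` loop of A;
-- fuel (the loop runs at most len+2 times per ngram: the start index grows every
-- iteration and find past the end is -1) only makes the recursion structural —
-- every step is exactly A's step
def fnpLoopA (s ng : List Char) (start : Int) : Nat → List Int
  | 0 => []
  | Nat.succ fuel =>
    let position := PySem.Chars.findFrom s ng start none
    if position ≠ -1 then
      (position + 1) :: fnpLoopA s ng (position + 1) fuel
    else []

def find_ngram_positions (string : String) (ngrams : List String) : List Int :=
  ngrams.foldl
    (fun ngram_positions ngram =>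
      let positions := fnpLoopA string.toList ngram.toList 0 (string.toList.length + 2)
      if positions ≠ [] then ngram_positions ++ positions else ngram_positions)
    []

-- ===== PORT B =====
-- hits = {ngram: [] for new ngram}; lengths = sorted({len(ngram) …});
-- for i in range(n+1): for L in lengths: if i+L<=n and string[i:i+L] in hits: append i+1;
-- return [p for ngram in ngrams for p in hits[ngram]]
def find_ngram_positions_alt (string : String) (ngrams : List String) : List Int :=
  let s := string.toList
  let n := s.length
  let hits : PySem.Dict (List Char) (List Int) :=
    ngrams.foldl (fun d ngram => if d.contains ngram.toList then d else d.insert ngram.toList []) PySem.Dict.empty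
  let lengths : List Int :=
    PySem.List.sorted (PySem.Set.ofList (ngrams.map (fun ngram => (ngram.toList.length : Int)))) (fun x => x) false
  let hits :=
    (PySem.List.pyRange 0 ((n : Int) + 1) 1).foldl (fun d i =>
      lengths.foldl (fun d L =>
        if i + L ≤ (n : Int) then
          let sub := PySem.List.slice s (some i) (some (i + L))
          if d.contains sub then d.modify sub [] (fun v => v ++ [i + 1]) else d
        else d) d) hits
  ngrams.flatMap (fun ngram => hits.getD ngram.toList [])

-- ===== PRECONDITION & SPEC =====
def Spec_find_ngram_positions (string : String) (ngrams : List String) (out : List Int) : Prop := out = find_ngram_positions_alt string ngrams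
instance (string : String) (ngrams : List String) (out : List Int) : Decidable (Spec_find_ngram_positions string ngrams out) := by unfold Spec_find_ngram_positions; infer_instance

-- ===== CLAIM (what is proved, stated in full; the proofs are below) =====
def Claim_equal_find_ngram_positions : Prop := ∀ (string : String) (ngrams : List String), Dom_find_ngram_positions string ngrams → Spec_find_ngram_positions string ngrams (find_ngram_positions string ngrams)

-- ===== LEMMAS AND PROOFS =====

-- canonical per-ngram occurrence list: 1-based positions i+1 of every i ≥ k with ng a prefix of s.drop i
def pvOcc (s ng : List Char) (k : Nat) : List Int :=
  ((List.range (s.length + 1)).filter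
      (fun i => decide (k ≤ i) && decide (ng <+: s.drop i))).map (fun i => (i : Int) + 1)

-- ---------- A side: the find loop yields the occurrence list ----------

-- str.find(ngram, start) with start past the end is -1 (CPython quirk, kept by PySem)
theorem findFrom_past (s ng : List Char) (k : Nat) (h : s.length < k) :
    PySem.Chars.findFrom s ng (k : Int) none = -1 := by
  simp only [PySem.Chars.findFrom]
  have h0 : ¬ ((k : Int) < 0) := by omega
  rw [if_neg h0, if_pos (by exact_mod_cast h)]

-- if no occurrence starts in [k, j), the start bound of the filter may be moved from k to j
theorem filter_and_shift (s ng : List Char) (l : List Nat) (k j : Nat) (hkj : k ≤ j)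
    (hmin : ∀ i, k ≤ i → i < j → ¬ ng <+: s.drop i) :
    l.filter (fun i => decide (k ≤ i) && decide (ng <+: s.drop i))
      = l.filter (fun i => decide (j ≤ i) && decide (ng <+: s.drop i)) := by
  apply List.filter_congr
  intro i _
  by_cases h1 : j ≤ i
  · have hk : k ≤ i := by omega
    simp [h1, hk]
  · by_cases h2 : k ≤ i
    · simp [h1, hmin i h2 (by omega)]
    · have hk : ¬ k ≤ i := h2
      simp [h1, hk]

-- peel the occurrence at j off the front of the filtered range
theorem filter_step (s ng : List Char) (j : Nat) (hj : j ≤ s.length) (hpre : ng <+: s.drop j) :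
    (List.range (s.length + 1)).filter (fun i => decide (j ≤ i) && decide (ng <+: s.drop i))
      = j :: (List.range (s.length + 1)).filter
          (fun i => decide (j + 1 ≤ i) && decide (ng <+: s.drop i)) := by
  have hsplit : s.length + 1 = j + (s.length + 1 - j) := by omega
  rw [hsplit, List.range_add, List.filter_append, List.filter_append]
  have h1 : (List.range j).filter (fun i => decide (j ≤ i) && decide (ng <+: s.drop i)) = [] := by
    rw [List.filter_eq_nil_iff]
    intro a ha
    have h := List.mem_range.mp ha
    simp [show ¬ j ≤ a by omega]
  have h1' : (List.range j).filter (fun i => decide (j + 1 ≤ i) && decide (ng <+: s.drop i)) = [] := by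
    rw [List.filter_eq_nil_iff]
    intro a ha
    have h := List.mem_range.mp ha
    simp [show ¬ j + 1 ≤ a by omega]
  rw [h1, h1']
  have hlen : s.length + 1 - j = (s.length - j) + 1 := by omega
  rw [hlen, List.range_succ_eq_map, List.map_cons, List.filter_cons, List.filter_cons]
  have hpj : (decide (j ≤ j + 0) && decide (ng <+: s.drop (j + 0))) = true := by simp [hpre]
  have hpj' : (decide (j + 1 ≤ j + 0) && decide (ng <+: s.drop (j + 0))) = false := by simp
  rw [hpj, hpj']
  simp only [List.nil_append, Nat.add_zero, if_true, Bool.false_eq_true, if_false]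
  congr 1
  apply List.filter_congr
  intro a ha
  obtain ⟨x, hx, rfl⟩ := List.mem_map.mp ha
  obtain ⟨y, _, rfl⟩ := List.mem_map.mp hx
  simp [show j ≤ j + Nat.succ y by omega, show j + 1 ≤ j + Nat.succ y by omega]

-- A's find loop started at k produces exactly the occurrences at positions ≥ k
theorem loopA_eq (s ng : List Char) :
    ∀ (fuel k : Nat), k ≤ s.length + 1 → s.length + 2 ≤ fuel + k →
      fnpLoopA s ng (k : Int) fuel = pvOcc s ng k := by
  intro fuel
  induction fuel with
  | zero => intro k hk hf; omega
  | succ fuel ih =>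
    intro k hk hf
    by_cases hks : k ≤ s.length
    · simp only [fnpLoopA]
      rw [PySem.Chars.findFrom_natCast s ng k hks]
      by_cases hfind : PySem.Chars.find (s.drop k) ng = -1
      · rw [if_pos hfind]
        simp only [ne_eq, not_true_eq_false, if_false]
        have hnin : ¬ ng <:+: s.drop k := (PySem.Chars.find_eq_neg_one_iff _ _).mp hfind
        have hempty : (List.range (s.length + 1)).filter
            (fun i => decide (k ≤ i) && decide (ng <+: s.drop i)) = [] := by
          rw [List.filter_eq_nil_iff]
          intro i _
          by_cases hki : k ≤ i
          · have hnp : ¬ ng <+: s.drop i := by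
              intro hp
              apply hnin
              rw [← PySem.Chars.isIn_iff_infix, ← PySem.Chars.exists_prefix_drop_iff_isIn]
              exact ⟨i - k, by rwa [List.drop_drop, show k + (i - k) = i by omega]⟩
            simp [hnp]
          · simp [hki]
        simp [pvOcc, hempty]
      · rw [if_neg hfind]
        have h0 : 0 ≤ PySem.Chars.find (s.drop k) ng := by
          have := PySem.Chars.neg_one_le_find (s.drop k) ng
          omega
        set f := PySem.Chars.find (s.drop k) ng with hfdef
        have hm : f = ((f.toNat : Nat) : Int) := (Int.toNat_of_nonneg h0).symm
        set m := f.toNat with hmdef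
        have hlen : f ≤ ((s.drop k).length : Int) := PySem.Chars.find_le_length _ _
        have hmle : k + m ≤ s.length := by
          rw [List.length_drop] at hlen; omega
        obtain ⟨hpre, hmin⟩ := PySem.Chars.find_spec (s := s.drop k) (sub := ng) h0
        rw [List.drop_drop] at hpre
        have hne : ¬ ((k : Int) + f = -1) := by omega
        rw [if_pos hne]
        have hcast : (k : Int) + f + 1 = ((k + m + 1 : Nat) : Int) := by
          rw [hm]; push_cast; ring
        rw [hcast, ih (k + m + 1) (by omega) (by omega)]
        have hminS : ∀ i, k ≤ i → i < k + m → ¬ ng <+: s.drop i := by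
          intro i hki hikm hp
          apply hmin (i - k) (by omega)
          rwa [List.drop_drop, show k + (i - k) = i by omega]
        unfold pvOcc
        rw [filter_and_shift s ng _ k (k + m) (by omega) hminS,
            filter_step s ng (k + m) hmle hpre]
        simp only [List.pure_def, List.bind_eq_flatMap, List.flatMap_cons, List.map_cons,
          List.cons_append, List.nil_append]
        push_cast
        ring_nf
    · simp only [fnpLoopA]
      rw [findFrom_past s ng k (by omega)]
      simp only [ne_eq, not_true_eq_false, if_false]
      have hempty : (List.range (s.length + 1)).filter
          (fun i => decide (k ≤ i) && decide (ng <+: s.drop i)) = [] := by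
        rw [List.filter_eq_nil_iff]
        intro i hi
        have := List.mem_range.mp hi
        simp [show ¬ k ≤ i by omega]
      simp [pvOcc, hempty]

-- ---------- B side: the shared scan fills the map with the occurrence lists ----------

-- the guarded append step of B's scan, on one (substring, position) event
def pvStep (d : PySem.Dict (List Char) (List Int)) (p : (List Char) × Int) : PySem.Dict (List Char) (List Int) :=
  if d.contains p.1 then d.modify p.1 [] (fun v => v ++ [p.2]) else d

theorem pvStep_contains (d : PySem.Dict (List Char) (List Int)) (p : (List Char) × Int) (c : List Char) :
    (pvStep d p).contains c = d.contains c := by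
  unfold pvStep
  by_cases h : d.contains p.1
  · rw [if_pos h, PySem.Dict.contains_modify]
    by_cases hc : c == p.1
    · have : c = p.1 := by simpa using hc
      simp [this, h]
    · simp [hc]
  · rw [if_neg h]

-- the guarded-append loop appends, per existing key, exactly the events of that key, in order
theorem pvStep_foldl_getD (l : List ((List Char) × Int)) :
    ∀ (d : PySem.Dict (List Char) (List Int)) (c : List Char),
      (l.foldl pvStep d).getD c []
        = d.getD c [] ++ (if d.contains c then (l.filter (fun p => p.1 == c)).map (fun p => p.2) else []) := by
  induction l with
  | nil => intro d c; by_cases h : d.contains c <;> simp [h]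
  | cons p l ih =>
    intro d c
    rw [List.foldl_cons, ih (pvStep d p) c, List.filter_cons]
    by_cases hc : d.contains p.1
    · have hstep : pvStep d p = d.modify p.1 [] (fun v => v ++ [p.2]) := by
        unfold pvStep; rw [if_pos hc]
      rw [hstep, PySem.Dict.getD_modify]
      have hcont : (d.modify p.1 [] (fun v => v ++ [p.2])).contains c = d.contains c := by
        rw [← hstep, pvStep_contains]
      rw [hcont]
      by_cases hceq : c = p.1
      · subst hceq
        simp [hc, List.append_assoc]
      · have hpc : (p.1 == c) = false := by simp [Ne.symm hceq]
        simp [hceq, hpc]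
    · have hstep : pvStep d p = d := by unfold pvStep; rw [if_neg hc]
      rw [hstep]
      by_cases hdc : d.contains c
      · have hpc : (p.1 == c) = false := by
          by_contra hx
          have : p.1 = c := by simpa using Bool.of_not_eq_false hx
          rw [this] at hc
          exact hc hdc
        simp [hdc, hpc]
      · simp [hdc]

-- a nested fold is the fold over the flattened event list
theorem foldl_foldl_flatMap {α : Type} (g : α → List ((List Char) × Int)) (l : List α) :
    ∀ d, l.foldl (fun d i => (g i).foldl pvStep d) d = (l.flatMap g).foldl pvStep d := by
  induction l with
  | nil => intro d; rfl
  | cons x l ih => intro d; rw [List.foldl_cons, List.flatMap_cons, List.foldl_append, ih]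

-- the init loop leaves [] at every key
theorem init_getD (l : List String) :
    ∀ (d : PySem.Dict (List Char) (List Int)), (∀ x, d.getD x [] = []) →
      ∀ c, (l.foldl (fun d ngram => if d.contains ngram.toList then d else d.insert ngram.toList []) d).getD c [] = [] := by
  induction l with
  | nil => intro d h c; exact h c
  | cons ng l ih =>
    intro d h c
    rw [List.foldl_cons]
    by_cases hc : d.contains ng.toList
    · rw [if_pos hc]; exact ih d h c
    · rw [if_neg hc]
      refine ih _ (fun x => ?_) c
      rw [PySem.Dict.getD_insert]
      by_cases hx : x = ng.toList
      · simp [hx]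
      · simp [hx, h x]

-- the init loop registers exactly the ngrams as keys
theorem init_contains (l : List String) :
    ∀ (d : PySem.Dict (List Char) (List Int)) (c : List Char),
      ((l.foldl (fun d ngram => if d.contains ngram.toList then d else d.insert ngram.toList []) d).contains c = true
        ↔ (c ∈ l.map (fun x => x.toList) ∨ d.contains c = true)) := by
  induction l with
  | nil => intro d c; simp
  | cons ng l ih =>
    intro d c
    rw [List.foldl_cons, List.map_cons, List.mem_cons]
    by_cases hc : d.contains ng.toList
    · rw [if_pos hc, ih]
      constructor
      · rintro (h | h)
        · exact Or.inl (Or.inr h)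
        · exact Or.inr h
      · rintro ((h | h) | h)
        · subst h; exact Or.inr hc
        · exact Or.inl h
        · exact Or.inr h
    · rw [if_neg hc, ih]
      rw [PySem.Dict.contains_insert]
      constructor
      · rintro (h | h)
        · exact Or.inl (Or.inr h)
        · rcases Bool.or_eq_true_iff.mp h with h | h
          · exact Or.inl (Or.inl (by simpa using h))
          · exact Or.inr h
      · rintro ((h | h) | h)
        · exact Or.inr (Bool.or_eq_true_iff.mpr (Or.inl (by simp [h])))
        · exact Or.inl h
        · exact Or.inr (Bool.or_eq_true_iff.mpr (Or.inr h))

-- a nodup list filtered by a predicate only x can satisfy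
theorem filter_eq_singleton {α : Type} (l : List α) (x : α) (p : α → Bool)
    (hnd : l.Nodup) (hx : x ∈ l) (hpx : p x = true) (honly : ∀ y ∈ l, p y = true → y = x) :
    l.filter p = [x] := by
  induction l with
  | nil => cases hx
  | cons a l ih =>
    rw [List.filter_cons]
    rcases List.mem_cons.mp hx with rfl | hxl
    · rw [if_pos hpx]
      have : l.filter p = [] := by
        rw [List.filter_eq_nil_iff]
        intro b hb hpb
        have := honly b (List.mem_cons_of_mem _ hb) hpb
        subst this
        exact (List.nodup_cons.mp hnd).1 hb
      rw [this]
    · have hpa : p a = false := by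
        by_cases h : p a = true
        · have := honly a List.mem_cons_self h
          subst this
          exact absurd hxl (List.nodup_cons.mp hnd).1
        · simpa using h
      rw [hpa]
      simp only [Bool.false_eq_true, if_false]
      exact ih (List.nodup_cons.mp hnd).2 hxl (fun y hy => honly y (List.mem_cons_of_mem _ hy))

-- flatMap of conditional singletons is map-of-filter
theorem flatMap_ite_singleton {α β : Type} (l : List α) (P : α → Prop) [DecidablePred P] (f : α → β) :
    l.flatMap (fun k => if P k then [f k] else []) = (l.filter (fun k => decide (P k))).map f := by
  induction l with
  | nil => rfl
  | cons a l ih =>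
    rw [List.flatMap_cons, List.filter_cons]
    by_cases h : P a
    · simp [h, ih]
    · simp [h, ih]

-- the (substring, position) events B's scan generates at position i
def pvEv (s : List Char) (lengths : List Int) (i : Int) : List ((List Char) × Int) :=
  (lengths.filter (fun L => decide (i + L ≤ (s.length : Int)))).map
    (fun L => (PySem.List.slice s (some i) (some (i + L)), i + 1))

-- the inner loop over lengths is the event-list fold
theorem inner_eq (s : List Char) (i : Int) (lengths : List Int) :
    ∀ d, lengths.foldl (fun d L =>
        if i + L ≤ (s.length : Int) then
          let sub := PySem.List.slice s (some i) (some (i + L))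
          if d.contains sub then d.modify sub [] (fun v => v ++ [i + 1]) else d
        else d) d = (pvEv s lengths i).foldl pvStep d := by
  induction lengths with
  | nil => intro d; rfl
  | cons L ls ih =>
    intro d
    rw [List.foldl_cons]
    unfold pvEv
    rw [List.filter_cons]
    by_cases h : i + L ≤ (s.length : Int)
    · simp only [h, decide_true, if_true, List.map_cons, List.foldl_cons]
      rw [ih]
      rfl
    · simp only [h, decide_false, Bool.false_eq_true, if_false]
      rw [ih]
      rfl

-- the events at position k that concern g: exactly one if g occurs at k, none otherwise
theorem ev_filter (s : List Char) (lengths : List Int) (hnd : lengths.Nodup)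
    (hpos : ∀ L ∈ lengths, 0 ≤ L) (g : List Char) (hg : (g.length : Int) ∈ lengths)
    (k : Nat) (hk : k ≤ s.length) :
    ((pvEv s lengths (k : Int)).filter (fun p => p.1 == g)).map (fun p => p.2)
      = if g <+: s.drop k then [(k : Int) + 1] else [] := by
  unfold pvEv
  rw [List.filter_map, List.filter_filter]
  simp only [Function.comp_apply]
  by_cases hpre : g <+: s.drop k
  · rw [if_pos hpre]
    have hsingle : lengths.filter (fun L =>
        (PySem.List.slice s (some (k : Int)) (some ((k : Int) + L)) == g)
          && decide ((k : Int) + L ≤ (s.length : Int))) = [(g.length : Int)] := by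
      apply filter_eq_singleton lengths ((g.length : Int)) _ hnd hg
      · have hgl : g.length ≤ s.length - k := by
          have := hpre.length_le
          rw [List.length_drop] at this
          omega
        have hb : ((k : Int) + (g.length : Int) ≤ (s.length : Int)) := by
          omega
        have hslice : PySem.List.slice s (some (k : Int)) (some ((k : Int) + (g.length : Int))) = g := by
          rw [PySem.List.slice_natCast_add]
          exact (List.prefix_iff_eq_take.mp hpre).symm
        simp [hslice, hb]
      · intro y hy hQy
        have hy0 : 0 ≤ y := hpos y hy
        have hycast : y = ((y.toNat : Nat) : Int) := (Int.toNat_of_nonneg hy0).symm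
        rw [hycast] at hQy
        rw [PySem.List.slice_natCast_add] at hQy
        have h1 : (List.take y.toNat (List.drop k s) == g) = true := (Bool.and_eq_true_iff.mp hQy).1
        have h2 : ((k : Int) + (y.toNat : Int) ≤ (s.length : Int)) := by
          have := (Bool.and_eq_true_iff.mp hQy).2
          exact of_decide_eq_true this
        have hyn : y.toNat ≤ s.length - k := by omega
        have heq : List.take y.toNat (List.drop k s) = g := by simpa using h1
        have hlen : g.length = y.toNat := by
          rw [← heq, List.length_take, List.length_drop]
          omega
        rw [hycast, ← hlen]
    rw [hsingle]
    simp
  · rw [if_neg hpre]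
    have hempty : lengths.filter (fun L =>
        (PySem.List.slice s (some (k : Int)) (some ((k : Int) + L)) == g)
          && decide ((k : Int) + L ≤ (s.length : Int))) = [] := by
      rw [List.filter_eq_nil_iff]
      intro y hy hQy
      have hy0 : 0 ≤ y := hpos y hy
      have hycast : y = ((y.toNat : Nat) : Int) := (Int.toNat_of_nonneg hy0).symm
      rw [hycast, PySem.List.slice_natCast_add] at hQy
      have h1 : List.take y.toNat (List.drop k s) = g := by
        have := (Bool.and_eq_true_iff.mp hQy).1
        simpa using this
      exact hpre (h1 ▸ List.take_prefix y.toNat (s.drop k))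
    rw [hempty]
    simp

theorem filter_flatMap {α β : Type} (l : List α) (g : α → List β) (p : β → Bool) :
    (l.flatMap g).filter p = l.flatMap (fun a => (g a).filter p) := by
  induction l with
  | nil => rfl
  | cons a l ih => rw [List.flatMap_cons, List.flatMap_cons, List.filter_append, ih]

theorem map_flatMap' {α β γ : Type} (l : List α) (g : α → List β) (f : β → γ) :
    (l.flatMap g).map f = l.flatMap (fun a => (g a).map f) := by
  induction l with
  | nil => rfl
  | cons a l ih => rw [List.flatMap_cons, List.flatMap_cons, List.map_append, ih]

theorem flatMap_congr_mem {α β : Type} (l : List α) (g g' : α → List β)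
    (h : ∀ a ∈ l, g a = g' a) : l.flatMap g = l.flatMap g' := by
  induction l with
  | nil => rfl
  | cons a l ih =>
    rw [List.flatMap_cons, List.flatMap_cons, h a List.mem_cons_self,
        ih (fun a ha => h a (List.mem_cons_of_mem _ ha))]

-- B produces, per ngram, exactly the occurrence list
theorem alt_eq (string : String) (ngrams : List String) :
    find_ngram_positions_alt string ngrams
      = ngrams.flatMap (fun ng => pvOcc string.toList ng.toList 0) := by
  unfold find_ngram_positions_alt
  simp only []
  set s := string.toList with hs
  set lengths : List Int :=
    PySem.List.sorted (PySem.Set.ofList (ngrams.map (fun ngram => (ngram.toList.length : Int)))) (fun x => x) false with hlengths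
  set d0 : PySem.Dict (List Char) (List Int) :=
    ngrams.foldl (fun d ngram => if d.contains ngram.toList then d else d.insert ngram.toList []) PySem.Dict.empty with hd0
  have hnd : lengths.Nodup := by
    rw [hlengths]
    exact (PySem.List.sorted_perm _ _ _).nodup_iff.mpr (PySem.Set.nodup_ofList _)
  have hposL : ∀ L ∈ lengths, 0 ≤ L := by
    intro L hL
    rw [hlengths, PySem.List.mem_sorted, PySem.Set.mem_ofList] at hL
    obtain ⟨ng, _, rfl⟩ := List.mem_map.mp hL
    positivity
  have houter : (PySem.List.pyRange 0 ((s.length : Int) + 1) 1).foldl (fun d i =>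
      lengths.foldl (fun d L =>
        if i + L ≤ (s.length : Int) then
          let sub := PySem.List.slice s (some i) (some (i + L))
          if d.contains sub then d.modify sub [] (fun v => v ++ [i + 1]) else d
        else d) d) d0
      = ((PySem.List.pyRange 0 ((s.length : Int) + 1) 1).flatMap (pvEv s lengths)).foldl pvStep d0 := by
    rw [← foldl_foldl_flatMap]
    apply PySem.List.foldl_congr_mem
    intro d i _
    exact inner_eq s i lengths d
  rw [houter]
  apply flatMap_congr_mem
  intro ng hng
  rw [pvStep_foldl_getD]
  have hget0 : d0.getD ng.toList [] = [] := by
    rw [hd0]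
    exact init_getD ngrams PySem.Dict.empty (fun x => by simp [PySem.Dict.getD_empty]) _
  have hcont : d0.contains ng.toList = true := by
    rw [hd0]
    exact (init_contains ngrams PySem.Dict.empty ng.toList).mpr
      (Or.inl (List.mem_map.mpr ⟨ng, hng, rfl⟩))
  rw [hget0, hcont, if_pos rfl, List.nil_append, filter_flatMap, map_flatMap']
  have hgl : ((ng.toList.length : Nat) : Int) ∈ lengths := by
    rw [hlengths, PySem.List.mem_sorted, PySem.Set.mem_ofList]
    exact List.mem_map.mpr ⟨ng, hng, rfl⟩
  rw [show ((s.length : Int) + 1) = ((s.length + 1 : Nat) : Int) by push_cast; ring,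
      PySem.List.pyRange_zero_nat, List.flatMap_map]
  rw [flatMap_congr_mem _ _ (fun k : Nat => if ng.toList <+: s.drop k then [(k : Int) + 1] else [])
      (fun k hk => by
        have hkn : k ≤ s.length := by
          have := List.mem_range.mp hk; omega
        exact ev_filter s lengths hnd hposL ng.toList hgl k hkn)]
  rw [flatMap_ite_singleton]
  unfold pvOcc
  have hp : (fun i : Nat => decide (0 ≤ i) && decide (ng.toList <+: s.drop i))
      = (fun i : Nat => decide (ng.toList <+: s.drop i)) := by funext i; simp
  rw [hp]
  simp only [List.pure_def, List.bind_eq_flatMap]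
  rw [show (fun a : Nat => ([(↑a : Int)] : List Int)) = (fun a : Nat => [(fun k : Nat => (k : Int)) a]) from rfl,
      ← List.map_eq_flatMap, List.map_map]
  rfl

-- ===== VERDICT (by name: the statement is the Claim_ definition above) =====
theorem find_ngram_positions_spec : Claim_equal_find_ngram_positions := by
  intro string ngrams _
  unfold Spec_find_ngram_positions
  rw [alt_eq]
  unfold find_ngram_positions
  have hbody : (fun (acc : List Int) (ngram : String) =>
      let positions := fnpLoopA string.toList ngram.toList 0 (string.toList.length + 2)
      if positions ≠ [] then acc ++ positions else acc)
      = (fun acc ngram => acc ++ fnpLoopA string.toList ngram.toList 0 (string.toList.length + 2)) := by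
    funext acc ngram
    by_cases h : fnpLoopA string.toList ngram.toList 0 (string.toList.length + 2) = []
    · simp only [h, ne_eq, not_true_eq_false, if_false, List.append_nil]
    · simp only [ne_eq, h, not_false_eq_true, if_true]
  rw [hbody, PySem.List.foldl_append_eq_flatMap, List.nil_append]
  apply flatMap_congr_mem
  intro ng _
  have := loopA_eq string.toList ng.toList (string.toList.length + 2) 0 (by omega) (by omega)
  simpa using this
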